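-- pv_equiv track=rewrite | github.com/magicat777/Audio-Analyzer-OMEGA | omega4/panels/chromagram.py | _get_scale_degrees
-- ===== SOURCE A (Python) =====
-- from typing import Dict, List, Tuple, Any, Optional
--
-- def _get_scale_degrees(root_note: str, is_major: bool) -> List[int]:
--     """Get scale degrees for a given key"""
--     note_names = ['C', 'C#', 'D', 'D#', 'E', 'F', 'F#', 'G', 'G#', 'A', 'A#', 'B']
--
--     try:
--         root_idx = note_names.index(root_note)
--     except ValueError:
--         return []
--
--     # Major scale intervals: W W H W W W H
--     # Minor scale intervals: W H W W H W W
--     if is_major: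
--         intervals = [2, 2, 1, 2, 2, 2, 1]
--     else:
--         intervals = [2, 1, 2, 2, 1, 2, 2]
--
--     scale_degrees = [root_idx]
--     current = root_idx
--     for interval in intervals[:-1]:  # We don't need the last interval back to root
--         current = (current + interval) % 12
--         scale_degrees.append(current)
--
--     return scale_degrees
-- ===== SOURCE B (Python) =====
-- def _get_scale_degrees(root_note: str, is_major: bool):
--     """Get scale degrees for a given key"""
--     note_names = ['C', 'C#', 'D', 'D#', 'E', 'F', 'F#', 'G', 'G#', 'A', 'A#', 'B']
--     try:
--         root_idx = note_names.index(root_note)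
--     except ValueError:
--         return []
--     offsets = [0, 2, 4, 5, 7, 9, 11] if is_major else [0, 2, 3, 5, 7, 8, 10]
--     return [(root_idx + off) % 12 for off in offsets]
-- ===== Notes on version B (the rewrite author's own statement) =====
-- stated objective: simpler
-- what changed: Replaced the step-by-step interval accumulation loop (running 'current' updated and appended per interval) with a fixed cumulative-offset table per mode and a single mapping pass (root_idx + off) % 12.
import Mathlib
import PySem

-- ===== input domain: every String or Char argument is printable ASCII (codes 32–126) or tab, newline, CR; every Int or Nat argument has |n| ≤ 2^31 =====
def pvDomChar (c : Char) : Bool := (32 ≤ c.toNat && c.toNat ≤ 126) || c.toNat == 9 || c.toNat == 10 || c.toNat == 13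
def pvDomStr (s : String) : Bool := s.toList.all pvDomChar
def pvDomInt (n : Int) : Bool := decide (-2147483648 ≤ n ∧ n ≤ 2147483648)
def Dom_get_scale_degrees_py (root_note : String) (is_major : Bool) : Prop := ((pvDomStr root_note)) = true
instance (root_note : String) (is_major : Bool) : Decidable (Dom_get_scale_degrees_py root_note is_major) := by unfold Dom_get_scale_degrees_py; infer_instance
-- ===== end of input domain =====

-- B replaces A's running-accumulator interval loop with a fixed cumulative-offset table and one mapping pass (simpler; same result).

def pvNoteNames : List String := ["C", "C#", "D", "D#", "E", "F", "F#", "G", "G#", "A", "A#", "B"]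

-- ===== PORT A =====
def get_scale_degrees_py (root_note : String) (is_major : Bool) : List Int :=
  match PySem.List.index? pvNoteNames root_note with
  | none => []
  | some root_idx =>
    let intervals : List Int := if is_major then [2, 2, 1, 2, 2, 2, 1] else [2, 1, 2, 2, 1, 2, 2]
    let st := (PySem.List.slice intervals none (some (-1))).foldl
      (fun (st : List Int × Int) interval =>
        let current := PySem.Int.mod (st.2 + interval) 12
        (st.1 ++ [current], current))
      ([(root_idx : Int)], (root_idx : Int))
    st.1

-- ===== PORT B =====
def get_scale_degrees_py_alt (root_note : String) (is_major : Bool) : List Int :=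
  match PySem.List.index? pvNoteNames root_note with
  | none => []
  | some root_idx =>
    let offsets : List Int := if is_major then [0, 2, 4, 5, 7, 9, 11] else [0, 2, 3, 5, 7, 8, 10]
    offsets.map (fun off => PySem.Int.mod ((root_idx : Int) + off) 12)

-- ===== PRECONDITION & SPEC =====
def Spec_get_scale_degrees_py (root_note : String) (is_major : Bool) (out : List Int) : Prop := out = get_scale_degrees_py_alt root_note is_major
instance (root_note : String) (is_major : Bool) (out : List Int) : Decidable (Spec_get_scale_degrees_py root_note is_major out) := by unfold Spec_get_scale_degrees_py; infer_instance

-- ===== CLAIM (what is proved, stated in full; the proofs are below) =====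
def Claim_equal_get_scale_degrees_py : Prop := ∀ (root_note : String) (is_major : Bool), Dom_get_scale_degrees_py root_note is_major → Spec_get_scale_degrees_py root_note is_major (get_scale_degrees_py root_note is_major)

-- ===== LEMMAS AND PROOFS =====

theorem get_scale_degrees_py_of_not_mem (root_note : String) (is_major : Bool)
    (h : root_note ∉ pvNoteNames) :
    get_scale_degrees_py root_note is_major = get_scale_degrees_py_alt root_note is_major := by
  have hidx : PySem.List.index? pvNoteNames root_note = none :=
    (PySem.List.index?_eq_none_iff _ _).mpr h
  simp only [get_scale_degrees_py, get_scale_degrees_py_alt, hidx]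

-- ===== VERDICT (by name: the statement is the Claim_ definition above) =====
theorem get_scale_degrees_py_spec : Claim_equal_get_scale_degrees_py := by
  intro root_note is_major _
  unfold Spec_get_scale_degrees_py
  by_cases h : root_note ∈ pvNoteNames
  · simp only [pvNoteNames, List.mem_cons, List.not_mem_nil, or_false] at h
    rcases h with h | h | h | h | h | h | h | h | h | h | h | h <;> subst h <;>
      cases is_major <;> decide
  · exact get_scale_degrees_py_of_not_mem root_note is_major h
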